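-- pv_equiv track=rewrite | github.com/GRGSIBERIA/electromotive | rptfile.py | makeheaders
-- ===== SOURCE A (Python) =====
-- def makeheaders(lines):
--     headers = {}
--     for i in range(len(lines)):
--         if "  X  " in lines[i]:
--             cnt = 1
--             header = lines[i].split("  X  ")[-1].strip()
--             while len(lines[i-cnt]) > 2 and i-cnt >= 0:
--                 header = lines[i-cnt].strip() + header
--                 cnt += 1
--             headers[i+2] = header   # 実際に読み込み始める行数を挿入
--     return headers
-- ===== SOURCE B (Python) =====
-- def makeheaders(lines):
--     # One forward pass: `block` accumulates stripped lines of the current run of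
--     # raw-length > 2 lines; a short line resets it.
--     headers = {}
--     block = ""
--     for i in range(len(lines)):
--         line = lines[i]
--         if "  X  " in line:
--             headers[i + 2] = block + line.split("  X  ")[-1].strip()
--         if len(line) > 2:
--             block += line.strip()
--         else:
--             block = ""
--     return headers
-- ===== Notes on version B (the rewrite author's own statement) =====
-- stated objective: alternative
-- what changed: Replaced the nested backward rescan before each marker line by a single forward pass that maintains a running accumulator string reset at each raw-length<=2 line; it trades the inner backward loop for an accumulator carried across iterations.
import Mathlib
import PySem

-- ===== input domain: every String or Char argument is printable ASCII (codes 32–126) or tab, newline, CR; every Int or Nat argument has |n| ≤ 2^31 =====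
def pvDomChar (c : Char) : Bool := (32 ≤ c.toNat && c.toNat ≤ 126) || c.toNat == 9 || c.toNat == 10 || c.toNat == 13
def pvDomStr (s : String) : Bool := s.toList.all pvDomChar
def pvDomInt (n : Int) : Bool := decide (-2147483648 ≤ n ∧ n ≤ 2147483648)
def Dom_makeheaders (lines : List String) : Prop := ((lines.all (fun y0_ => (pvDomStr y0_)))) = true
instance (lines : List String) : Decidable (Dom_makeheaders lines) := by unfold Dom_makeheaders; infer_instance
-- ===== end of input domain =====

-- B replaces A's backward rescan before every marker line by one forward pass with a
-- running accumulator string (objective: alternative single-pass formulation).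

-- ===== PORT A =====
-- the inner `while len(lines[i-cnt]) > 2 and i-cnt >= 0: header = lines[i-cnt].strip() + header; cnt += 1`
def pvHeadScan (lines : List String) (i cnt : Nat) (header : String) : String :=
  match PySem.List.pyGet? lines ((i : Int) - (cnt : Int)) with
  | none => header            -- unreachable in A's loop (index is ≥ -1 and lines ≠ [])
  | some s =>
    if _hc : 2 < PySem.Str.len s ∧ 0 ≤ (i : Int) - (cnt : Int) then
      pvHeadScan lines i (cnt + 1) (PySem.Str.strip s ++ header)
    else header
termination_by i + 1 - cnt
decreasing_by
  have : (cnt : Int) ≤ (i : Int) := by omega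
  omega

def makeheaders (lines : List String) : List (Int × String) :=
  ((List.range lines.length).foldl
    (fun (headers : PySem.Dict Int String) i =>
      let line := lines.getD i ""
      if PySem.Str.isIn "  X  " line then
        let header0 := PySem.Str.strip (PySem.List.pyGetD ((PySem.Str.split? line "  X  ").getD []) (-1) "")
        headers.insert ((i : Int) + 2) (pvHeadScan lines i 1 header0)
      else headers)
    PySem.Dict.empty).items

-- ===== PORT B =====
def makeheaders_alt (lines : List String) : List (Int × String) :=
  ((List.range lines.length).foldl
    (fun (st : PySem.Dict Int String × String) i =>
      let line := lines.getD i ""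
      let headers :=
        if PySem.Str.isIn "  X  " line then
          st.1.insert ((i : Int) + 2)
            (st.2 ++ PySem.Str.strip (PySem.List.pyGetD ((PySem.Str.split? line "  X  ").getD []) (-1) ""))
        else st.1
      let block := if 2 < PySem.Str.len line then st.2 ++ PySem.Str.strip line else ""
      (headers, block))
    (PySem.Dict.empty, "")).1.items

-- ===== PRECONDITION & SPEC =====
def Spec_makeheaders (lines : List String) (out : List (Int × String)) : Prop := out = makeheaders_alt lines
instance (lines : List String) (out : List (Int × String)) : Decidable (Spec_makeheaders lines out) := by unfold Spec_makeheaders; infer_instance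

-- ===== CLAIM (what is proved, stated in full; the proofs are below) =====
def Claim_equal_makeheaders : Prop := ∀ (lines : List String), Dom_makeheaders lines → Spec_makeheaders lines (makeheaders lines)

-- ===== LEMMAS AND PROOFS =====

-- the accumulator B maintains: concatenation of the stripped lines of the maximal
-- run of raw-length > 2 lines ending just before index m
def pvBlockAt (lines : List String) : Nat → String
  | 0 => ""
  | m + 1 =>
    let line := lines.getD m ""
    if 2 < PySem.Str.len line then pvBlockAt lines m ++ PySem.Str.strip line else ""

theorem pvHeadScan_eq (lines : List String) :
    ∀ (k i cnt : Nat) (tail : String), i < lines.length → 1 ≤ cnt → cnt ≤ i + 1 →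
      k = i + 1 - cnt → pvHeadScan lines i cnt tail = pvBlockAt lines k ++ tail := by
  intro k
  induction k with
  | zero =>
    intro i cnt tail hi h1 hle hk
    have hcnt : cnt = i + 1 := by omega
    subst hcnt
    rw [pvHeadScan]
    have hidx : (i : Int) - ((i + 1 : Nat) : Int) = -1 := by push_cast; ring
    rw [hidx]
    rcases h : PySem.List.pyGet? lines (-1) with _ | s
    · simp [pvBlockAt, String.empty_append]
    · simp [pvBlockAt, String.empty_append]
  | succ j ih =>
    intro i cnt tail hi h1 hle hk
    have hcnt : cnt ≤ i := by omega
    have hjlt : j < lines.length := by omega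
    have hidx : (i : Int) - (cnt : Int) = ((j : Nat) : Int) := by omega
    rw [pvHeadScan, hidx, PySem.List.pyGet?_natCast, List.getElem?_eq_getElem hjlt]
    by_cases hl : 2 < PySem.Str.len lines[j]
    · simp only [hl, Int.natCast_nonneg, and_true, dif_pos]
      rw [ih i (cnt + 1) _ hi (by omega) (by omega) (by omega)]
      have hb : pvBlockAt lines (j + 1) = pvBlockAt lines j ++ PySem.Str.strip lines[j] := by
        simp only [pvBlockAt, List.getD_eq_getElem?_getD, List.getElem?_eq_getElem hjlt,
          Option.getD_some]
        rw [if_pos (by have := PySem.Str.len_eq lines[j]; omega)]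
      rw [hb, String.append_assoc]
    · simp only [hl, false_and, dif_neg, not_false_iff]
      have hb : pvBlockAt lines (j + 1) = "" := by
        simp only [pvBlockAt, List.getD_eq_getElem?_getD, List.getElem?_eq_getElem hjlt,
          Option.getD_some]
        rw [if_neg (by have := PySem.Str.len_eq lines[j]; omega)]
      rw [hb, String.empty_append]

theorem pvFold_eq (lines : List String) : ∀ (m : Nat), m ≤ lines.length →
    ((List.range m).foldl
      (fun (headers : PySem.Dict Int String) i =>
        let line := lines.getD i ""
        if PySem.Str.isIn "  X  " line then
          let header0 := PySem.Str.strip (PySem.List.pyGetD ((PySem.Str.split? line "  X  ").getD []) (-1) "")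
          headers.insert ((i : Int) + 2) (pvHeadScan lines i 1 header0)
        else headers)
      PySem.Dict.empty
     =
     ((List.range m).foldl
       (fun (st : PySem.Dict Int String × String) i =>
         let line := lines.getD i ""
         let headers :=
           if PySem.Str.isIn "  X  " line then
             st.1.insert ((i : Int) + 2)
               (st.2 ++ PySem.Str.strip (PySem.List.pyGetD ((PySem.Str.split? line "  X  ").getD []) (-1) ""))
           else st.1
         let block := if 2 < PySem.Str.len line then st.2 ++ PySem.Str.strip line else ""
         (headers, block))
       (PySem.Dict.empty, "")).1)
    ∧
    ((List.range m).foldl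
       (fun (st : PySem.Dict Int String × String) i =>
         let line := lines.getD i ""
         let headers :=
           if PySem.Str.isIn "  X  " line then
             st.1.insert ((i : Int) + 2)
               (st.2 ++ PySem.Str.strip (PySem.List.pyGetD ((PySem.Str.split? line "  X  ").getD []) (-1) ""))
           else st.1
         let block := if 2 < PySem.Str.len line then st.2 ++ PySem.Str.strip line else ""
         (headers, block))
       (PySem.Dict.empty, "")).2 = pvBlockAt lines m := by
  intro m
  induction m with
  | zero => simp [pvBlockAt]
  | succ m ih =>
    intro hm
    obtain ⟨ih1, ih2⟩ := ih (by omega)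
    have hmlt : m < lines.length := by omega
    rw [List.range_succ]
    simp only [List.foldl_append, List.foldl_cons, List.foldl_nil]
    rw [ih1]
    refine ⟨?_, ?_⟩
    · rw [ih2, pvHeadScan_eq lines m m 1 _ hmlt (by omega) (by omega) (by omega)]
    · rw [ih2]
      simp [pvBlockAt, List.getD_eq_getElem?_getD, List.getElem?_eq_getElem hmlt]

-- ===== VERDICT (by name: the statement is the Claim_ definition above) =====
theorem makeheaders_spec : Claim_equal_makeheaders := by
  intro lines _
  unfold Spec_makeheaders makeheaders makeheaders_alt
  rw [(pvFold_eq lines lines.length le_rfl).1]
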